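-- pv_equiv track=rewrite | github.com/TheTimelessPuppeteer/chi-saho-wei-2026-python | weeks/week-07/solutions/1114405013/hand_10093.py | solve_grid
-- ===== SOURCE A (Python) =====
-- def build_row_states(cols):
--     states = []
--     for state in range(1 << cols):
--         if state & (state << 1):
--             continue
--         if state & (state << 2):
--             continue
--         states.append(state)
--     return states
--
-- def solve_grid(grid):
--     rows = len(grid)
--     cols = len(grid[0]) if rows else 0
--
--     all_states = build_row_states(cols)
--     state_guns = {s: s.bit_count() for s in all_states}
--
--     plain_masks = []
--     for row in grid:
--         mask = 0
--         for c, ch in enumerate(row):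
--             if ch == "P":
--                 mask |= 1 << c
--         plain_masks.append(mask)
--
--     valid_row_states = []
--     for r in range(rows):
--         candidates = []
--         for state in all_states:
--             if state & ~plain_masks[r]:
--                 continue
--             candidates.append(state)
--         valid_row_states.append(candidates)
--
--     dp = {(0, 0): 0}
--
--     for r in range(rows):
--         new_dp = {}
--         for (prev1, prev2), best in dp.items():
--             for cur in valid_row_states[r]:
--                 if cur & prev1:
--                     continue
--                 if cur & prev2:
--                     continue
--
--                 key = (cur, prev1)
--                 value = best + state_guns[cur]
--                 if value > new_dp.get(key, -1):
--                     new_dp[key] = value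
--         dp = new_dp
--
--     return max(dp.values()) if dp else 0
-- ===== SOURCE B (Python) =====
-- def solve_grid(grid):
--     rows = len(grid)
--     cols = len(grid[0]) if rows else 0
--
--     all_states = [s for s in range(1 << cols)
--                   if not (s & (s << 1)) and not (s & (s << 2))]
--
--     def row_mask(row):
--         m = 0
--         for c, ch in enumerate(row):
--             if ch == "P":
--                 m |= 1 << c
--         return m
--
--     states = []
--     for row in grid:
--         m = row_mask(row)
--         states.append([s for s in all_states if not (s & ~m)])
--
--     memo = {}
--
--     def rec(r, p1, p2):
--         if r == rows:
--             return 0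
--         key = (r, p1, p2)
--         if key in memo:
--             return memo[key]
--         best = -1
--         for cur in states[r]:
--             if cur & p1 or cur & p2:
--                 continue
--             v = cur.bit_count() + rec(r + 1, cur, p1)
--             if v > best:
--                 best = v
--         memo[key] = best
--         return best
--
--     # seed the memo bottom-up so that no call recurses more than one level deep
--     for r in range(rows - 1, 0, -1):
--         for p1 in states[r - 1]:
--             for p2 in (states[r - 2] if r >= 2 else [0]):
--                 if not (p1 & p2):
--                     rec(r, p1, p2)
--
--     return rec(0, 0, 0)
-- ===== Notes on version B (the rewrite author's own statement) =====
-- stated objective: alternative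
-- what changed: A's bottom-up DP that rolls a dict keyed by (cur,prev1) forward over the rows and takes max(dp.values()) at the end is replaced by a top-down memoized recursion rec(r, prev1, prev2) = max over compatible states cur of row r of cur.bit_count() + rec(r+1, cur, prev1), returning rec(0, 0, 0).
import Mathlib
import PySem

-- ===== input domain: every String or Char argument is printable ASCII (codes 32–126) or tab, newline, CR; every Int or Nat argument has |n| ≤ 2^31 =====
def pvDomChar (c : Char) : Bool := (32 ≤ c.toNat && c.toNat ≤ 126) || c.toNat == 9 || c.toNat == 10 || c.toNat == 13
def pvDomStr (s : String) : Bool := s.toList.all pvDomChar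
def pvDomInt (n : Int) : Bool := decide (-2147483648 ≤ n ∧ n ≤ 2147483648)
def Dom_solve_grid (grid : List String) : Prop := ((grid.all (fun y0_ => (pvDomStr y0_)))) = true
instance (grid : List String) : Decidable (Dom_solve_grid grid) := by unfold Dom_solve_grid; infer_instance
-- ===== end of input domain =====

-- B replaces A's bottom-up dict-rolling DP over rows by a top-down memoized recursion
-- rec(r, prev1, prev2) over the remaining rows (objective: alternative decomposition, same asymptotic cost).

-- ===== PORT A =====
def build_row_states (cols : Int) : List Int :=
  (PySem.List.pyRange 0 ((1:Int) <<< cols.toNat) 1).foldl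
    (fun states state =>
      if PySem.Int.band state (state <<< (1:Nat)) ≠ 0 then states
      else if PySem.Int.band state (state <<< (2:Nat)) ≠ 0 then states
      else states ++ [state]) []

def solve_grid (grid : List String) : Int :=
  let rows : Int := grid.length
  -- 'len(grid[0]) if rows else 0': the index 0 is guarded by rows ≠ 0, so pyGetD is exact here
  let cols : Int := if rows ≠ 0 then PySem.Str.len (PySem.List.pyGetD grid 0 "") else 0
  let all_states := build_row_states cols
  let state_guns : PySem.Dict Int Int :=
    all_states.foldl (fun d s => d.insert s (PySem.Int.bitCount s : Int)) PySem.Dict.empty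
  let plain_masks : List Int :=
    grid.foldl (fun acc row =>
      let mask := (PySem.List.enumerate row.toList 0).foldl
        (fun mask p => if p.2 = 'P' then PySem.Int.bor mask ((1:Int) <<< p.1.toNat) else mask) 0
      acc ++ [mask]) []
  let valid_row_states : List (List Int) :=
    (PySem.List.pyRange 0 rows 1).foldl (fun acc r =>
      let candidates := all_states.foldl (fun cand state =>
        if PySem.Int.band state (Int.not (PySem.List.pyGetD plain_masks r 0)) ≠ 0 then cand
        else cand ++ [state]) []
      acc ++ [candidates]) []
  let dp0 : PySem.Dict (Int × Int) Int := PySem.Dict.empty.insert (0, 0) 0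
  let dpF := (PySem.List.pyRange 0 rows 1).foldl (fun dp r =>
    dp.items.foldl (fun new_dp it =>
      (PySem.List.pyGetD valid_row_states r []).foldl (fun new_dp cur =>
        if PySem.Int.band cur it.1.1 ≠ 0 then new_dp
        else if PySem.Int.band cur it.1.2 ≠ 0 then new_dp
        else
          let key := (cur, it.1.1)
          -- state_guns[cur]: cur is drawn from all_states, whose every element is a key, so getD is exact
          let value := it.2 + state_guns.getD cur 0
          if value > new_dp.getD key (-1) then new_dp.insert key value else new_dp) new_dp)
      PySem.Dict.empty) dp0
  match PySem.List.max? dpF.values (fun v => v) with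
  | some m => m
  | none => 0

-- ===== PORT B =====
def pvRowMask (row : String) : Int :=
  (PySem.List.enumerate row.toList 0).foldl
    (fun m p => if p.2 = 'P' then PySem.Int.bor m ((1:Int) <<< p.1.toNat) else m) 0

def pvAllStates (cols : Int) : List Int :=
  (PySem.List.pyRange 0 ((1:Int) <<< cols.toNat) 1).filter
    (fun s => PySem.Int.band s (s <<< (1:Nat)) == 0 && PySem.Int.band s (s <<< (2:Nat)) == 0)

-- Python B's memo dict, threaded through the recursion; fuel (= number of remaining rows at the
-- top call) is only a totality guard, the 'fuel = 0' branch is unreachable in every actual call.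
mutual
def pvRec (states : List (List Int)) (rows : Int) (fuel : Nat) (r p1 p2 : Int)
    (memo : PySem.Dict (Int × Int × Int) Int) : Int × PySem.Dict (Int × Int × Int) Int :=
  if r = rows then (0, memo)
  else match fuel with
    | 0 => (0, memo)
    | fuel + 1 =>
      match memo.get? (r, p1, p2) with
      | some v => (v, memo)
      | none =>
        let res := pvLoop states rows fuel r p1 p2 (PySem.List.pyGetD states r []) (-1) memo
        (res.1, res.2.insert (r, p1, p2) res.1)
termination_by (fuel, 0)

def pvLoop (states : List (List Int)) (rows : Int) (fuel : Nat) (r p1 p2 : Int)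
    (l : List Int) (best : Int) (memo : PySem.Dict (Int × Int × Int) Int) :
    Int × PySem.Dict (Int × Int × Int) Int :=
  match l with
  | [] => (best, memo)
  | cur :: rest =>
    if PySem.Int.band cur p1 ≠ 0 ∨ PySem.Int.band cur p2 ≠ 0 then
      pvLoop states rows fuel r p1 p2 rest best memo
    else
      let vm := pvRec states rows fuel (r + 1) cur p1 memo
      let v := (PySem.Int.bitCount cur : Int) + vm.1
      pvLoop states rows fuel r p1 p2 rest (if v > best then v else best) vm.2
termination_by (fuel, l.length + 1)
end

def solve_grid_alt (grid : List String) : Int :=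
  let rows : Int := grid.length
  let cols : Int := if rows ≠ 0 then PySem.Str.len (PySem.List.pyGetD grid 0 "") else 0
  let all_states := pvAllStates cols
  let states : List (List Int) :=
    grid.foldl (fun acc row =>
      let m := pvRowMask row
      acc ++ [all_states.filter (fun s => PySem.Int.band s (Int.not m) == 0)]) []
  -- seed the memo bottom-up (the Python loop 'for r in range(rows-1, 0, -1): ...'):
  let memo : PySem.Dict (Int × Int × Int) Int :=
    (PySem.List.pyRange (rows - 1) 0 (-1)).foldl (fun memo r =>
      (PySem.List.pyGetD states (r - 1) []).foldl (fun memo p1 =>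
        (if r ≥ 2 then PySem.List.pyGetD states (r - 2) [] else [(0 : Int)]).foldl (fun memo p2 =>
          if PySem.Int.band p1 p2 = 0 then (pvRec states rows grid.length r p1 p2 memo).2
          else memo) memo) memo) PySem.Dict.empty
  (pvRec states rows grid.length 0 0 0 memo).1

-- ===== PRECONDITION & SPEC =====
def Spec_solve_grid (grid : List String) (out : Int) : Prop := out = solve_grid_alt grid
instance (grid : List String) (out : Int) : Decidable (Spec_solve_grid grid out) := by unfold Spec_solve_grid; infer_instance

-- ===== CLAIM (what is proved, stated in full; the proofs are below) =====
def Claim_equal_solve_grid : Prop := ∀ (grid : List String), Dom_solve_grid grid → Spec_solve_grid grid (solve_grid grid)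

-- ===== LEMMAS AND PROOFS =====

def bestVal : List (List Int) → Int → Int → Int
  | [], _, _ => 0
  | sts :: rest, p1, p2 =>
    sts.foldl (fun best cur =>
      if PySem.Int.band cur p1 ≠ 0 ∨ PySem.Int.band cur p2 ≠ 0 then best
      else max best ((PySem.Int.bitCount cur : Int) + bestVal rest cur p1)) (-1)

theorem foldl_max_pull (l : List Int) (a b : Int) :
    l.foldl max (max a b) = max a (l.foldl max b) := by
  induction l generalizing b with
  | nil => rfl
  | cons x t ih =>
    simp only [List.foldl_cons]
    rw [max_assoc, ih]

theorem foldl_max_nonempty (y : Int) (t : List Int) (a : Int) (hy : -1 ≤ y) :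
    (y :: t).foldl max a = max a ((y :: t).foldl max (-1)) := by
  simp only [List.foldl_cons]
  rw [show max (-1) y = y by omega, ← foldl_max_pull]

theorem foldl_max_map_distrib (b : Int) (l : List Int) (c : Int) :
    (l.map (fun y => b + y)).foldl max (b + c) = b + l.foldl max c := by
  induction l generalizing c with
  | nil => rfl
  | cons x t ih =>
    simp only [List.map_cons, List.foldl_cons]
    rw [show max (b + c) (b + x) = b + max c x by omega, ih]

theorem foldl_max_middle (xs ys : List Int) (x a : Int) :
    (xs ++ x :: ys).foldl max a = max x ((xs ++ ys).foldl max a) := by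
  rw [List.foldl_append, List.foldl_append, List.foldl_cons,
    show max (xs.foldl max a) x = max x (xs.foldl max a) by omega, foldl_max_pull]

theorem foldl_max_map_add (b : Int) (l : List Int) (a : Int)
    (hl : l ≠ []) (hb : 0 ≤ b) (hel : ∀ y ∈ l, -1 ≤ y) :
    (l.map (fun y => b + y)).foldl max a = max a (b + l.foldl max (-1)) := by
  obtain ⟨y, t, rfl⟩ := List.exists_cons_of_ne_nil hl
  have hy : -1 ≤ y := hel y (by simp)
  rw [List.map_cons, foldl_max_nonempty (b + y) _ a (by omega), ← List.map_cons]
  congr 1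
  show ((y :: t).map (fun y => b + y)).foldl max (-1) = b + (y :: t).foldl max (-1)
  simp only [List.map_cons, List.foldl_cons]
  rw [show max (-1) (b + y) = b + max (-1) y by omega, foldl_max_map_distrib]

def cpt (p1 p2 : Int) (c : Int) : Bool :=
  decide ¬(PySem.Int.band c p1 ≠ 0 ∨ PySem.Int.band c p2 ≠ 0)

theorem bestVal_cons (sts : List Int) (rest : List (List Int)) (p1 p2 : Int) :
    bestVal (sts :: rest) p1 p2 =
      ((sts.filter (cpt p1 p2)).map
        (fun c => (PySem.Int.bitCount c : Int) + bestVal rest c p1)).foldl max (-1) := by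
  show sts.foldl _ (-1) = _
  rw [List.foldl_map]
  rw [show (fun (best : Int) cur =>
      if PySem.Int.band cur p1 ≠ 0 ∨ PySem.Int.band cur p2 ≠ 0 then best
      else max best ((PySem.Int.bitCount cur : Int) + bestVal rest cur p1))
    = (fun (best : Int) cur =>
      if ¬(PySem.Int.band cur p1 ≠ 0 ∨ PySem.Int.band cur p2 ≠ 0) then
        max best ((PySem.Int.bitCount cur : Int) + bestVal rest cur p1) else best) by
    funext best cur; split_ifs <;> tauto]
  rw [PySem.List.foldl_ite_eq_foldl_filter]
  rfl

theorem band_zero_left (a : Int) : PySem.Int.band 0 a = 0 := by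
  rw [PySem.Int.band_comm]; exact PySem.Int.band_zero a

theorem cpt_zero (p1 p2 : Int) : cpt p1 p2 0 = true := by
  simp [cpt, band_zero_left]

def AllZero (vs : List (List Int)) : Prop := ∀ l ∈ vs, 0 ∈ l

theorem bestVal_nonneg (vs : List (List Int)) (p1 p2 : Int) (h : AllZero vs) :
    0 ≤ bestVal vs p1 p2 := by
  induction vs generalizing p1 p2 with
  | nil => simp [bestVal]
  | cons sts rest ih =>
    rw [bestVal_cons]
    have h0 : (0:Int) ∈ sts.filter (cpt p1 p2) :=
      List.mem_filter.mpr ⟨h sts (by simp), cpt_zero p1 p2⟩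
    have hmem : (PySem.Int.bitCount (0:Int) : Int) + bestVal rest 0 p1 ∈
        (sts.filter (cpt p1 p2)).map
          (fun c => (PySem.Int.bitCount c : Int) + bestVal rest c p1) :=
      List.mem_map.mpr ⟨0, h0, rfl⟩
    have := (PySem.List.le_foldl_max ((sts.filter (cpt p1 p2)).map
      (fun c => (PySem.Int.bitCount c : Int) + bestVal rest c p1)) (-1)).2 _ hmem
    have hrec : 0 ≤ bestVal rest 0 p1 := ih 0 p1 (fun l hl => h l (by simp [hl]))
    simp [PySem.Int.bitCount_zero] at this
    omega

def mI (d : PySem.Dict (Int × Int) Int) (g : Int × Int → Int) : Int :=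
  (d.items.map (fun it => it.2 + g it.1)).foldl max (-1)

def stepD (d : PySem.Dict (Int × Int) Int) (k : Int × Int) (v : Int) : PySem.Dict (Int × Int) Int :=
  if v > d.getD k (-1) then d.insert k v else d

theorem items_split (d : PySem.Dict (Int × Int) Int) (k : Int × Int) (w : Int)
    (hnd : d.keys.Nodup) (hm : (k, w) ∈ d.items) :
    ∃ l1 l2, d.items = l1 ++ (k, w) :: l2 ∧ ∀ p ∈ l1 ++ l2, p.1 ≠ k := by
  obtain ⟨l1, l2, he⟩ := List.append_of_mem hm
  refine ⟨l1, l2, he, ?_⟩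
  have hk : d.keys = l1.map Prod.fst ++ k :: l2.map Prod.fst := by
    rw [PySem.Dict.keys, he]; simp
  rw [hk, List.nodup_append] at hnd
  obtain ⟨h1, h2, h3⟩ := hnd
  intro p hp hpk
  have hmk : k ∈ (l1 ++ l2).map Prod.fst := by
    rw [← hpk]; exact List.mem_map_of_mem hp
  rw [List.map_append, List.mem_append] at hmk
  rcases hmk with hh | hh
  · exact h3 k hh k List.mem_cons_self rfl
  · exact (List.nodup_cons.mp h2).1 hh

theorem contains_of_getD_gt (d : PySem.Dict (Int × Int) Int) (k : Int × Int)
    (h : -1 < d.getD k (-1)) : d.contains k = true := by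
  by_contra hc
  rw [PySem.Dict.getD_of_not_contains d (-1) (by simpa using hc)] at h
  omega

theorem mI_stepD (d : PySem.Dict (Int × Int) Int) (k : Int × Int) (v : Int)
    (g : Int × Int → Int) (hnd : d.keys.Nodup) (hv : -1 < v) :
    mI (stepD d k v) g = max (mI d g) (v + g k) := by
  unfold stepD
  split_ifs with hgt
  · by_cases hc : d.contains k = true
    · -- overwrite an existing smaller value
      have hs : (d.get? k).isSome := by
        rw [← PySem.Dict.contains_eq_isSome_get?]; exact hc
      obtain ⟨w, hw⟩ := Option.isSome_iff_exists.mp hs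
      have hwd : d.getD k (-1) = w := PySem.Dict.getD_of_get?_eq_some d (-1) hw
      obtain ⟨l1, l2, hit, hne⟩ := items_split d k w hnd (PySem.Dict.mem_items_of_get?_eq_some d hw)
      have hins : (d.insert k v).items = l1 ++ (k, v) :: l2 := by
        rw [PySem.Dict.items_insert_of_contains d v hc, hit]
        simp only [List.map_append, List.map_cons]
        congr 1
        · exact (List.map_congr_left (g := id) (fun p hp => by
            simp [show (p.1 == k) = false by
              simpa using hne p (List.mem_append_left _ hp)])).trans (List.map_id _)
        · congr 1
          · simp
          · exact (List.map_congr_left (g := id) (fun p hp => by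
              simp [show (p.1 == k) = false by
                simpa using hne p (List.mem_append_right _ hp)])).trans (List.map_id _)
      unfold mI
      rw [hins, hit]
      simp only [List.map_append, List.map_cons]
      rw [foldl_max_middle, foldl_max_middle, ← List.map_append]
      have : w + g k ≤ v + g k := by omega
      omega
    · have hgd : d.getD k (-1) = -1 :=
        PySem.Dict.getD_of_not_contains d (-1) (by simpa using hc)
      unfold mI
      rw [PySem.Dict.items_insert_of_not_contains d v (by simpa using hc)]
      simp only [List.map_append, List.map_cons, List.map_nil]
      rw [List.foldl_append]
      simp
  · -- kept: the existing entry dominates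
    have hge : v ≤ d.getD k (-1) := by omega
    have hc : d.contains k = true := contains_of_getD_gt d k (by omega)
    have hs : (d.get? k).isSome := by
      rw [← PySem.Dict.contains_eq_isSome_get?]; exact hc
    obtain ⟨w, hw⟩ := Option.isSome_iff_exists.mp hs
    have hwd : d.getD k (-1) = w := PySem.Dict.getD_of_get?_eq_some d (-1) hw
    have hmem : w + g k ∈ d.items.map (fun it => it.2 + g it.1) :=
      List.mem_map.mpr ⟨(k, w), PySem.Dict.mem_items_of_get?_eq_some d hw, rfl⟩
    have hle := (PySem.List.le_foldl_max (d.items.map (fun it => it.2 + g it.1)) (-1)).2 _ hmem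
    unfold mI
    omega

theorem nodup_stepD (d : PySem.Dict (Int × Int) Int) (k : Int × Int) (v : Int)
    (h : d.keys.Nodup) : (stepD d k v).keys.Nodup := by
  unfold stepD; split_ifs
  · exact PySem.Dict.nodup_keys_insert d k v h
  · exact h

theorem keys_sub_stepD (d : PySem.Dict (Int × Int) Int) (k : Int × Int) (v : Int) :
    d.keys ⊆ (stepD d k v).keys := by
  unfold stepD; split_ifs
  · intro x hx
    exact (PySem.Dict.mem_keys_insert d k x v).mpr (Or.inr hx)
  · exact fun x hx => hx

theorem values_stepD (d : PySem.Dict (Int × Int) Int) (k : Int × Int) (v w : Int)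
    (h : w ∈ (stepD d k v).values) : w = v ∨ w ∈ d.values := by
  unfold stepD at h; split_ifs at h
  · exact PySem.Dict.mem_values_insert d k v w h
  · exact Or.inr h

theorem keys_stepD_ne_nil (d : PySem.Dict (Int × Int) Int) (k : Int × Int) (v : Int)
    (hv : -1 < v) : (stepD d k v).keys ≠ [] := by
  unfold stepD; split_ifs with hgt
  · have : k ∈ (d.insert k v).keys := (PySem.Dict.mem_keys_insert d k k v).mpr (Or.inl rfl)
    exact List.ne_nil_of_mem this
  · have hc : d.contains k = true := contains_of_getD_gt d k (by omega)
    exact List.ne_nil_of_mem ((PySem.Dict.contains_iff_mem_keys d k).mp hc)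

theorem mI_foldl_stepD (ps : List ((Int × Int) × Int)) (d : PySem.Dict (Int × Int) Int)
    (g : Int × Int → Int) (hnd : d.keys.Nodup) (hv : ∀ p ∈ ps, -1 < p.2) :
    mI (ps.foldl (fun d p => stepD d p.1 p.2) d) g
      = (ps.map (fun p => p.2 + g p.1)).foldl max (mI d g) := by
  induction ps generalizing d with
  | nil => rfl
  | cons p t ih =>
    simp only [List.foldl_cons, List.map_cons]
    rw [ih _ (nodup_stepD _ _ _ hnd) (fun q hq => hv q (by simp [hq])),
      mI_stepD d p.1 p.2 g hnd (hv p (by simp))]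

theorem nodup_foldl_stepD (ps : List ((Int × Int) × Int)) (d : PySem.Dict (Int × Int) Int)
    (hnd : d.keys.Nodup) : (ps.foldl (fun d p => stepD d p.1 p.2) d).keys.Nodup := by
  induction ps generalizing d with
  | nil => exact hnd
  | cons p t ih => exact ih _ (nodup_stepD _ _ _ hnd)

theorem values_foldl_stepD (ps : List ((Int × Int) × Int)) (d : PySem.Dict (Int × Int) Int)
    (w : Int) (h : w ∈ (ps.foldl (fun d p => stepD d p.1 p.2) d).values) :
    w ∈ d.values ∨ ∃ p ∈ ps, w = p.2 := by
  induction ps generalizing d with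
  | nil => exact Or.inl h
  | cons p t ih =>
    rcases ih (stepD d p.1 p.2) h with hh | hh
    · rcases values_stepD d p.1 p.2 w hh with hh2 | hh2
      · exact Or.inr ⟨p, by simp, hh2⟩
      · exact Or.inl hh2
    · obtain ⟨q, hq, hw⟩ := hh
      exact Or.inr ⟨q, by simp [hq], hw⟩

theorem keys_sub_foldl_stepD (ps : List ((Int × Int) × Int)) (d : PySem.Dict (Int × Int) Int) :
    d.keys ⊆ (ps.foldl (fun d p => stepD d p.1 p.2) d).keys := by
  induction ps generalizing d with
  | nil => exact fun x h => h
  | cons p t ih => exact fun x hx => ih _ (keys_sub_stepD d p.1 p.2 hx)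

theorem keys_foldl_stepD_ne_nil (ps : List ((Int × Int) × Int)) (d : PySem.Dict (Int × Int) Int)
    (hps : ps ≠ []) (hv : ∀ p ∈ ps, -1 < p.2) :
    (ps.foldl (fun d p => stepD d p.1 p.2) d).keys ≠ [] := by
  obtain ⟨p, t, rfl⟩ := List.exists_cons_of_ne_nil hps
  simp only [List.foldl_cons]
  have h1 := keys_stepD_ne_nil d p.1 p.2 (hv p (by simp))
  obtain ⟨x, hx⟩ := List.exists_mem_of_ne_nil _ h1
  exact List.ne_nil_of_mem (keys_sub_foldl_stepD t _ hx)



-- ===== B side: the memoized recursion computes bestVal =====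
def GoodM (states : List (List Int)) (memo : PySem.Dict (Int × Int × Int) Int) : Prop :=
  ∀ (rn : Nat) (p1 p2 v : Int),
    memo.get? ((rn : Int), p1, p2) = some v → v = bestVal (states.drop rn) p1 p2

theorem pvRec_spec (fuel : Nat) (states : List (List Int)) :
    ∀ (rn : Nat) (p1 p2 : Int) (memo : PySem.Dict (Int × Int × Int) Int),
      states.length - rn ≤ fuel → rn ≤ states.length → GoodM states memo →
      (pvRec states (states.length : Int) fuel (rn : Int) p1 p2 memo).1
          = bestVal (states.drop rn) p1 p2
        ∧ GoodM states (pvRec states (states.length : Int) fuel (rn : Int) p1 p2 memo).2 := by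
  induction fuel with
  | zero =>
    intro rn p1 p2 memo hf hr hg
    have hrl : rn = states.length := by omega
    subst hrl
    rw [pvRec]
    simp only [if_true]
    exact ⟨by simp [List.drop_length, bestVal], hg⟩
  | succ fuel ih =>
    intro rn p1 p2 memo hf hr hg
    by_cases hrl : rn = states.length
    · subst hrl
      rw [pvRec]
      simp only [if_true]
      exact ⟨by simp [List.drop_length, bestVal], hg⟩
    · have hlt : rn < states.length := by omega
      have hne : ((rn : Int)) ≠ ((states.length : Int)) := by
        intro h; exact hrl (by exact_mod_cast h)
      rw [pvRec]
      rw [if_neg hne]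
      have hloop : ∀ (l : List Int) (best : Int)
          (memo' : PySem.Dict (Int × Int × Int) Int), GoodM states memo' →
          (pvLoop states (states.length : Int) fuel (rn : Int) p1 p2 l best memo').1
            = l.foldl (fun b cur =>
                if PySem.Int.band cur p1 ≠ 0 ∨ PySem.Int.band cur p2 ≠ 0 then b
                else max b ((PySem.Int.bitCount cur : Int)
                  + bestVal (states.drop (rn + 1)) cur p1)) best
          ∧ GoodM states
              (pvLoop states (states.length : Int) fuel (rn : Int) p1 p2 l best memo').2 := by
        intro l
        induction l with
        | nil => intro best memo' hg'; rw [pvLoop]; exact ⟨rfl, hg'⟩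
        | cons cur rest ihl =>
          intro best memo' hg'
          rw [pvLoop]
          by_cases hskip : PySem.Int.band cur p1 ≠ 0 ∨ PySem.Int.band cur p2 ≠ 0
          · rw [if_pos hskip]
            simp only [List.foldl_cons, if_pos hskip]
            exact ihl best memo' hg'
          · rw [if_neg hskip]
            have hcast : ((rn : Int)) + 1 = ((rn + 1 : Nat) : Int) := by push_cast; ring
            have hrec := ih (rn + 1) cur p1 memo' (by omega) (by omega) hg'
            rw [hcast]
            simp only [List.foldl_cons, if_neg hskip]
            rw [hrec.1]
            have hmax : (if (PySem.Int.bitCount cur : Int)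
                  + bestVal (states.drop (rn + 1)) cur p1 > best then
                (PySem.Int.bitCount cur : Int) + bestVal (states.drop (rn + 1)) cur p1
              else best)
              = max best ((PySem.Int.bitCount cur : Int)
                  + bestVal (states.drop (rn + 1)) cur p1) := by
              split_ifs <;> omega
            rw [hmax]
            exact ihl _ _ hrec.2
      cases hget : memo.get? ((rn : Int), p1, p2) with
      | some v => exact ⟨hg rn p1 p2 v hget, hg⟩
      | none =>
        simp only []
        have hgd : PySem.List.pyGetD states ((rn : Int)) ([] : List Int) = states[rn] := by
          rw [PySem.List.pyGetD_natCast]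
          exact List.getD_eq_getElem states [] hlt
        obtain ⟨h1, h2⟩ := hloop (PySem.List.pyGetD states ((rn : Int)) []) (-1) memo hg
        have hbv : (pvLoop states (states.length : Int) fuel (rn : Int) p1 p2
            (PySem.List.pyGetD states ((rn : Int)) []) (-1) memo).1
            = bestVal (states.drop rn) p1 p2 := by
          rw [h1, hgd, List.drop_eq_getElem_cons hlt]
          rfl
        refine ⟨hbv, ?_⟩
        intro rn' q1 q2 v hv
        rw [PySem.Dict.get?_insert] at hv
        split_ifs at hv with hkey
        · obtain ⟨hk1, hk2, hk3⟩ : ((rn' : Int)) = ((rn : Int)) ∧ q1 = p1 ∧ q2 = p2 := by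
            simpa [Prod.ext_iff] using hkey
          have : rn' = rn := by exact_mod_cast hk1
          subst this; subst hk2; subst hk3
          rw [← hbv]
          exact (Option.some.injEq _ _).mp hv |>.symm
        · exact h2 rn' q1 q2 v hv


-- ===== canonical row-state table shared by both sides =====
def colsOf (grid : List String) : Int :=
  if (grid.length : Int) ≠ 0 then PySem.Str.len (PySem.List.pyGetD grid 0 "") else 0

def pvValid (grid : List String) (cols : Int) : List (List Int) :=
  grid.map (fun row =>
    (pvAllStates cols).filter (fun s => PySem.Int.band s (Int.not (pvRowMask row)) == 0))

theorem zero_mem_pvAllStates (cols : Int) : (0 : Int) ∈ pvAllStates cols := by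
  unfold pvAllStates
  refine List.mem_filter.mpr ⟨?_, by simp⟩
  refine PySem.List.mem_pyRange_one.mpr ⟨le_refl 0, ?_⟩
  rw [Int.shiftLeft_eq]
  positivity

theorem allZero_pvValid (grid : List String) (cols : Int) : AllZero (pvValid grid cols) := by
  intro l hl
  obtain ⟨row, _, rfl⟩ := List.mem_map.mp hl
  exact List.mem_filter.mpr ⟨zero_mem_pvAllStates cols, by simp [band_zero_left]⟩


theorem goodM_fold_calls {A : Type} (states : List (List Int)) (l : List A)
    (F : PySem.Dict (Int × Int × Int) Int → A → PySem.Dict (Int × Int × Int) Int)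
    (h : ∀ (m : PySem.Dict (Int × Int × Int) Int) (x : A), x ∈ l →
      GoodM states m → GoodM states (F m x))
    (memo : PySem.Dict (Int × Int × Int) Int) (hg : GoodM states memo) :
    GoodM states (l.foldl F memo) := by
  induction l generalizing memo with
  | nil => exact hg
  | cons x t ih =>
    exact ih (fun m y hy => h m y (by simp [hy])) (F memo x) (h memo x (by simp) hg)

theorem B_eq (grid : List String) :
    solve_grid_alt grid = bestVal (pvValid grid (colsOf grid)) 0 0 := by
  simp only [solve_grid_alt]
  rw [show (if (grid.length : Int) ≠ 0 then PySem.Str.len (PySem.List.pyGetD grid 0 "") else 0)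
      = colsOf grid from rfl]
  have hst : grid.foldl (fun acc row =>
      acc ++ [(pvAllStates (colsOf grid)).filter
        (fun s => PySem.Int.band s (Int.not (pvRowMask row)) == 0)]) []
      = pvValid grid (colsOf grid) := by
    rw [PySem.List.foldl_append_singleton_eq_map
      (f := fun row => (pvAllStates (colsOf grid)).filter
        (fun s => PySem.Int.band s (Int.not (pvRowMask row)) == 0))]
    rfl
  rw [hst]
  set cols := colsOf grid with hcols
  set vs := pvValid grid cols with hvs
  have hlen : (grid.length : Int) = (vs.length : Int) := by simp [hvs, pvValid]
  have hfuel : grid.length = vs.length := by simp [hvs, pvValid]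
  rw [hlen, hfuel]
  have hgood : GoodM vs ((PySem.List.pyRange ((vs.length : Int) - 1) 0 (-1)).foldl (fun memo r =>
      (PySem.List.pyGetD vs (r - 1) []).foldl (fun memo p1 =>
        (if r ≥ 2 then PySem.List.pyGetD vs (r - 2) [] else [(0 : Int)]).foldl (fun memo p2 =>
          if PySem.Int.band p1 p2 = 0
          then (pvRec vs (vs.length : Int) vs.length r p1 p2 memo).2
          else memo) memo) memo) PySem.Dict.empty) := by
    apply goodM_fold_calls
    · intro m r hr hg
      obtain ⟨hr1, hr2⟩ := PySem.List.mem_pyRange_neg_one.mp hr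
      apply goodM_fold_calls
      · intro m1 p1 _ hg1
        apply goodM_fold_calls
        · intro m2 p2 _ hg2
          by_cases hb : PySem.Int.band p1 p2 = 0
          · rw [if_pos hb]
            have hrn : r = ((r.toNat : Nat) : Int) := (Int.toNat_of_nonneg (by omega)).symm
            rw [hrn]
            exact (pvRec_spec vs.length vs r.toNat p1 p2 m2 (by omega) (by omega) hg2).2
          · rw [if_neg hb]
            exact hg2
        · exact hg1
      · exact hg
    · intro rn p1 p2 v hv
      rw [PySem.Dict.get?_empty] at hv
      cases hv
  have := (pvRec_spec vs.length vs 0 0 0 _ (by omega) (by omega) hgood).1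
  simpa using this

-- ===== A side: normalising the port's loops =====
theorem build_eq (cols : Int) : build_row_states cols = pvAllStates cols := by
  unfold build_row_states pvAllStates
  rw [show (fun (states : List Int) state =>
      if PySem.Int.band state (state <<< (1:Nat)) ≠ 0 then states
      else if PySem.Int.band state (state <<< (2:Nat)) ≠ 0 then states
      else states ++ [state])
    = (fun (states : List Int) state =>
      if (PySem.Int.band state (state <<< (1:Nat)) == 0
          && PySem.Int.band state (state <<< (2:Nat)) == 0) = true
      then states ++ [state] else states) by
    funext states state
    by_cases h1 : PySem.Int.band state (state <<< (1:Nat)) = 0 <;>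
      by_cases h2 : PySem.Int.band state (state <<< (2:Nat)) = 0 <;>
      simp [h1, h2]]
  rw [PySem.List.foldl_append_if_eq_filter]
  simp

theorem masks_eq (grid : List String) :
    grid.foldl (fun acc row =>
      acc ++ [(PySem.List.enumerate row.toList 0).foldl
        (fun mask p => if p.2 = 'P' then PySem.Int.bor mask ((1:Int) <<< p.1.toNat) else mask) 0]) []
      = grid.map pvRowMask := by
  show grid.foldl (fun acc row => acc ++ [pvRowMask row]) [] = grid.map pvRowMask
  rw [PySem.List.foldl_append_singleton_eq_map (f := pvRowMask)]
  rfl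

theorem candEq (cols m : Int) :
    (pvAllStates cols).foldl (fun cand state =>
      if PySem.Int.band state (Int.not m) ≠ 0 then cand else cand ++ [state]) []
      = (pvAllStates cols).filter (fun s => PySem.Int.band s (Int.not m) == 0) := by
  rw [show (fun (cand : List Int) state =>
      if PySem.Int.band state (Int.not m) ≠ 0 then cand else cand ++ [state])
    = (fun (cand : List Int) state =>
      if (PySem.Int.band state (Int.not m) == 0) = true then cand ++ [state] else cand) by
    funext cand state
    by_cases h : PySem.Int.band state (Int.not m) = 0 <;> simp [h]]
  rw [PySem.List.foldl_append_if_eq_filter]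
  simp

theorem getD_insert_fun (l : List Int) (f : Int → Int) (d : PySem.Dict Int Int) (x dflt : Int) :
    (l.foldl (fun d s => d.insert s (f s)) d).getD x dflt
      = if x ∈ l then f x else d.getD x dflt := by
  induction l generalizing d with
  | nil => simp
  | cons a t ih =>
    simp only [List.foldl_cons]
    rw [ih]
    by_cases hx : x ∈ t
    · simp [hx]
    · by_cases hxa : x = a <;> simp [hx, hxa, PySem.Dict.getD_insert]


-- ===== the per-row transition of A's dict DP =====
def rowStep (sts : List Int) (dp : PySem.Dict (Int × Int) Int) : PySem.Dict (Int × Int) Int :=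
  dp.items.foldl (fun nd it =>
    sts.foldl (fun nd cur =>
      if PySem.Int.band cur it.1.1 ≠ 0 then nd
      else if PySem.Int.band cur it.1.2 ≠ 0 then nd
      else if it.2 + (PySem.Int.bitCount cur : Int) > nd.getD (cur, it.1.1) (-1)
        then nd.insert (cur, it.1.1) (it.2 + (PySem.Int.bitCount cur : Int)) else nd) nd)
    PySem.Dict.empty

def contribs (sts : List Int) (dp : PySem.Dict (Int × Int) Int) : List ((Int × Int) × Int) :=
  dp.items.flatMap (fun it =>
    (sts.filter (cpt it.1.1 it.1.2)).map
      (fun cur => ((cur, it.1.1), it.2 + (PySem.Int.bitCount cur : Int))))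

theorem rowStep_eq_foldl_contribs (sts : List Int) (dp : PySem.Dict (Int × Int) Int) :
    rowStep sts dp = (contribs sts dp).foldl (fun d p => stepD d p.1 p.2) PySem.Dict.empty := by
  unfold rowStep contribs
  rw [List.foldl_flatMap]
  apply PySem.List.foldl_congr_mem
  intro nd it _
  rw [show (fun (nd : PySem.Dict (Int × Int) Int) cur =>
      if PySem.Int.band cur it.1.1 ≠ 0 then nd
      else if PySem.Int.band cur it.1.2 ≠ 0 then nd
      else if it.2 + (PySem.Int.bitCount cur : Int) > nd.getD (cur, it.1.1) (-1)
        then nd.insert (cur, it.1.1) (it.2 + (PySem.Int.bitCount cur : Int)) else nd)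
    = (fun (nd : PySem.Dict (Int × Int) Int) cur =>
      if ¬(PySem.Int.band cur it.1.1 ≠ 0 ∨ PySem.Int.band cur it.1.2 ≠ 0) then
        stepD nd (cur, it.1.1) (it.2 + (PySem.Int.bitCount cur : Int)) else nd) by
    funext nd cur
    unfold stepD
    split_ifs <;> tauto]
  rw [PySem.List.foldl_ite_eq_foldl_filter]
  rw [List.foldl_map]
  rfl

theorem contribs_val_nonneg (sts : List Int) (dp : PySem.Dict (Int × Int) Int)
    (hval : ∀ w ∈ dp.values, 0 ≤ w) :
    ∀ p ∈ contribs sts dp, 0 ≤ p.2 := by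
  intro p hp
  obtain ⟨it, hit, hmem⟩ := List.mem_flatMap.mp hp
  obtain ⟨cur, _, rfl⟩ := List.mem_map.mp hmem
  have h2 : it.2 ∈ dp.values := by
    unfold PySem.Dict.values
    exact List.mem_map.mpr ⟨it, hit, rfl⟩
  have := hval _ h2
  have : (0:Int) ≤ (PySem.Int.bitCount cur : Int) := by positivity
  omega

theorem contribs_ne_nil (sts : List Int) (dp : PySem.Dict (Int × Int) Int)
    (h0 : 0 ∈ sts) (hne : dp.items ≠ []) : contribs sts dp ≠ [] := by
  obtain ⟨it, hit⟩ := List.exists_mem_of_ne_nil _ hne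
  apply List.ne_nil_of_mem (a := (((0:Int), it.1.1), it.2 + (PySem.Int.bitCount (0:Int) : Int)))
  exact List.mem_flatMap.mpr ⟨it, hit,
    List.mem_map.mpr ⟨0, List.mem_filter.mpr ⟨h0, cpt_zero _ _⟩, rfl⟩⟩


theorem foldl_max_flat {A : Type} (items : List A) (F : A → List Int) (h : A → Int)
    (hper : ∀ (a : Int) (it : A), it ∈ items → (F it).foldl max a = max a (h it)) :
    items.foldl (fun a it => (F it).foldl max a) (-1) = (items.map h).foldl max (-1) := by
  suffices hgen : ∀ (a : Int), items.foldl (fun a it => (F it).foldl max a) a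
      = (items.map h).foldl max a from hgen (-1)
  induction items with
  | nil => intro a; rfl
  | cons x t ih =>
    intro a
    simp only [List.foldl_cons, List.map_cons]
    rw [hper a x (by simp)]
    exact ih (fun a it hit => hper a it (by simp [hit])) (max a (h x))

theorem rowStep_mI (sts : List Int) (rest : List (List Int)) (dp : PySem.Dict (Int × Int) Int)
    (h0 : 0 ∈ sts) (hAZ : AllZero rest)
    (hval : ∀ w ∈ dp.values, 0 ≤ w) :
    mI (rowStep sts dp) (fun k => bestVal rest k.1 k.2)
      = mI dp (fun k => bestVal (sts :: rest) k.1 k.2) := by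
  rw [rowStep_eq_foldl_contribs]
  rw [mI_foldl_stepD _ _ _ (by simp)
    (fun p hp => by have := contribs_val_nonneg sts dp hval p hp; omega)]
  have hempty : mI PySem.Dict.empty (fun k => bestVal rest k.1 k.2) = -1 := rfl
  rw [hempty]
  unfold contribs
  rw [List.map_flatMap, List.foldl_flatMap]
  have hper : ∀ (a : Int) (it : (Int × Int) × Int), it ∈ dp.items →
      (((sts.filter (cpt it.1.1 it.1.2)).map
          (fun cur => ((cur, it.1.1), it.2 + (PySem.Int.bitCount cur : Int)))).map
        (fun p => p.2 + bestVal rest p.1.1 p.1.2)).foldl max a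
      = max a (it.2 + bestVal (sts :: rest) it.1.1 it.1.2) := by
    intro a it hit
    rw [List.map_map]
    have hmaps : ((sts.filter (cpt it.1.1 it.1.2)).map
        ((fun p => p.2 + bestVal rest p.1.1 p.1.2) ∘
          (fun cur => ((cur, it.1.1), it.2 + (PySem.Int.bitCount cur : Int)))))
        = ((sts.filter (cpt it.1.1 it.1.2)).map
            (fun cur => (PySem.Int.bitCount cur : Int) + bestVal rest cur it.1.1)).map
          (fun y => it.2 + y) := by
      rw [List.map_map]
      apply List.map_congr_left
      intro cur _
      simp [Function.comp]
      ring
    rw [hmaps]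
    have hit2 : (0:Int) ≤ it.2 := hval it.2 (by
      unfold PySem.Dict.values
      exact List.mem_map.mpr ⟨it, hit, rfl⟩)
    have hbase_ne : (sts.filter (cpt it.1.1 it.1.2)).map
        (fun cur => (PySem.Int.bitCount cur : Int) + bestVal rest cur it.1.1) ≠ [] := by
      apply List.ne_nil_of_mem (a := (PySem.Int.bitCount (0:Int) : Int) + bestVal rest 0 it.1.1)
      exact List.mem_map.mpr ⟨0, List.mem_filter.mpr ⟨h0, cpt_zero _ _⟩, rfl⟩
    have hel : ∀ y ∈ (sts.filter (cpt it.1.1 it.1.2)).map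
        (fun cur => (PySem.Int.bitCount cur : Int) + bestVal rest cur it.1.1), -1 ≤ y := by
      intro y hy
      obtain ⟨cur, _, rfl⟩ := List.mem_map.mp hy
      have h1 : (0:Int) ≤ (PySem.Int.bitCount cur : Int) := by positivity
      have h2 := bestVal_nonneg rest cur it.1.1 hAZ
      omega
    rw [foldl_max_map_add it.2 _ a hbase_ne hit2 hel]
    rw [← bestVal_cons]
  rw [foldl_max_flat dp.items
    (fun it => (List.map (fun p => p.2 + bestVal rest p.1.1 p.1.2)
      (List.map (fun cur => ((cur, it.1.1), it.2 + (PySem.Int.bitCount cur : Int)))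
        (List.filter (cpt it.1.1 it.1.2) sts))))
    (fun it => it.2 + bestVal (sts :: rest) it.1.1 it.1.2) hper]
  unfold mI
  rw [List.foldl_map]

theorem rowStep_inv (sts : List Int) (dp : PySem.Dict (Int × Int) Int)
    (h0 : 0 ∈ sts) (hval : ∀ w ∈ dp.values, 0 ≤ w) (hne : dp.items ≠ []) :
    (rowStep sts dp).keys.Nodup ∧ (∀ w ∈ (rowStep sts dp).values, 0 ≤ w)
      ∧ (rowStep sts dp).items ≠ [] := by
  rw [rowStep_eq_foldl_contribs]
  refine ⟨nodup_foldl_stepD _ _ (by simp), ?_, ?_⟩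
  · intro w hw
    rcases values_foldl_stepD _ _ _ hw with hh | hh
    · simp [PySem.Dict.values, PySem.Dict.empty] at hh
    · obtain ⟨p, hp, rfl⟩ := hh
      exact contribs_val_nonneg sts dp hval p hp
  · have hk := keys_foldl_stepD_ne_nil (contribs sts dp) PySem.Dict.empty
      (contribs_ne_nil sts dp h0 hne)
      (fun p hp => by have := contribs_val_nonneg sts dp hval p hp; omega)
    intro hitems
    exact hk (by unfold PySem.Dict.keys; rw [hitems]; rfl)

theorem main_fold (vs : List (List Int)) (dp : PySem.Dict (Int × Int) Int)
    (hAZ : AllZero vs) (hnd : dp.keys.Nodup)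
    (hval : ∀ w ∈ dp.values, 0 ≤ w) (hne : dp.items ≠ []) :
    mI (vs.foldl (fun dp sts => rowStep sts dp) dp) (fun k => bestVal [] k.1 k.2)
        = mI dp (fun k => bestVal vs k.1 k.2)
      ∧ (∀ w ∈ (vs.foldl (fun dp sts => rowStep sts dp) dp).values, 0 ≤ w)
      ∧ (vs.foldl (fun dp sts => rowStep sts dp) dp).items ≠ [] := by
  induction vs generalizing dp with
  | nil => exact ⟨rfl, hval, hne⟩
  | cons sts rest ih =>
    have h0 : 0 ∈ sts := hAZ sts (by simp)
    have hAZr : AllZero rest := fun l hl => hAZ l (by simp [hl])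
    obtain ⟨hnd', hval', hne'⟩ := rowStep_inv sts dp h0 hval hne
    simp only [List.foldl_cons]
    obtain ⟨h1, h2, h3⟩ := ih (rowStep sts dp) hAZr hnd' hval' hne'
    exact ⟨by rw [h1, rowStep_mI sts rest dp h0 hAZr hval], h2, h3⟩


theorem valid_eq (grid : List String) (cols : Int) :
    (PySem.List.pyRange 0 (grid.length : Int) 1).foldl (fun acc r =>
      acc ++ [(pvAllStates cols).foldl (fun cand state =>
        if PySem.Int.band state (Int.not (PySem.List.pyGetD (grid.map pvRowMask) r 0)) ≠ 0
        then cand else cand ++ [state]) []]) []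
      = pvValid grid cols := by
  rw [show (fun (acc : List (List Int)) (r : Int) =>
      acc ++ [(pvAllStates cols).foldl (fun cand state =>
        if PySem.Int.band state (Int.not (PySem.List.pyGetD (grid.map pvRowMask) r 0)) ≠ 0
        then cand else cand ++ [state]) []])
    = (fun (acc : List (List Int)) (r : Int) => acc ++ [(pvAllStates cols).filter
        (fun s => PySem.Int.band s (Int.not (PySem.List.pyGetD (grid.map pvRowMask) r 0)) == 0)]) by
    funext acc r; rw [candEq]]
  rw [PySem.List.foldl_append_singleton_eq_map (f := fun r => (pvAllStates cols).filter
      (fun s => PySem.Int.band s (Int.not (PySem.List.pyGetD (grid.map pvRowMask) r 0)) == 0))]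
  rw [List.nil_append]
  rw [show (fun (r : Int) => (pvAllStates cols).filter
      (fun s => PySem.Int.band s (Int.not (PySem.List.pyGetD (grid.map pvRowMask) r 0)) == 0))
    = (fun (m : Int) => (pvAllStates cols).filter
        (fun s => PySem.Int.band s (Int.not m) == 0)) ∘
      (fun r => PySem.List.pyGetD (grid.map pvRowMask) r 0) from rfl]
  rw [← List.map_map]
  rw [show ((grid.length : Int)) = ((grid.map pvRowMask).length : Int) by simp]
  rw [PySem.List.map_pyGetD_pyRange_zero' (grid.map pvRowMask) 0]
  rw [List.map_map]
  rfl

theorem dpbody_eq (cols : Int) (sts : List Int) (hs : sts ⊆ pvAllStates cols)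
    (dp : PySem.Dict (Int × Int) Int) :
    dp.items.foldl (fun nd it => sts.foldl (fun nd cur =>
      if PySem.Int.band cur it.1.1 ≠ 0 then nd
      else if PySem.Int.band cur it.1.2 ≠ 0 then nd
      else if it.2 + ((pvAllStates cols).foldl
          (fun d s => d.insert s (PySem.Int.bitCount s : Int)) PySem.Dict.empty).getD cur 0
          > nd.getD (cur, it.1.1) (-1)
        then nd.insert (cur, it.1.1) (it.2 + ((pvAllStates cols).foldl
          (fun d s => d.insert s (PySem.Int.bitCount s : Int)) PySem.Dict.empty).getD cur 0)
        else nd) nd) PySem.Dict.empty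
      = rowStep sts dp := by
  unfold rowStep
  apply PySem.List.foldl_congr_mem
  intro nd it _
  apply PySem.List.foldl_congr_mem
  intro nd2 cur hcur
  rw [getD_insert_fun (pvAllStates cols) (fun s => (PySem.Int.bitCount s : Int))]
  rw [if_pos (hs hcur)]

theorem A_eq (grid : List String) :
    solve_grid grid = bestVal (pvValid grid (colsOf grid)) 0 0 := by
  simp only [solve_grid]
  rw [show (if (grid.length : Int) ≠ 0 then PySem.Str.len (PySem.List.pyGetD grid 0 "") else 0)
      = colsOf grid from rfl]
  rw [build_eq, masks_eq, valid_eq]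
  rw [show ((grid.length : Int)) = ((pvValid grid (colsOf grid)).length : Int) by simp [pvValid]]
  rw [PySem.List.foldl_pyRange_zero_pyGetD' (pvValid grid (colsOf grid)) ([] : List Int)
    (fun dp sts => List.foldl (fun new_dp (it : (Int × Int) × Int) => List.foldl (fun new_dp cur =>
      if PySem.Int.band cur it.1.1 ≠ 0 then new_dp
      else if PySem.Int.band cur it.1.2 ≠ 0 then new_dp
      else if it.2 + ((pvAllStates (colsOf grid)).foldl
          (fun d s => d.insert s (PySem.Int.bitCount s : Int)) PySem.Dict.empty).getD cur 0
          > new_dp.getD (cur, it.1.1) (-1)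
        then new_dp.insert (cur, it.1.1) (it.2 + ((pvAllStates (colsOf grid)).foldl
          (fun d s => d.insert s (PySem.Int.bitCount s : Int)) PySem.Dict.empty).getD cur 0)
        else new_dp) new_dp sts) PySem.Dict.empty dp.items)
    (PySem.Dict.empty.insert (0, 0) 0)]
  set cols := colsOf grid with hcols
  set vs := pvValid grid cols with hvs
  set dp0 : PySem.Dict (Int × Int) Int := PySem.Dict.empty.insert (0, 0) 0 with hdp0
  have hbody : ∀ (dp : PySem.Dict (Int × Int) Int) (sts : List Int), sts ∈ vs →
      dp.items.foldl (fun nd it => sts.foldl (fun nd cur =>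
        if PySem.Int.band cur it.1.1 ≠ 0 then nd
        else if PySem.Int.band cur it.1.2 ≠ 0 then nd
        else if it.2 + ((pvAllStates cols).foldl
            (fun d s => d.insert s (PySem.Int.bitCount s : Int)) PySem.Dict.empty).getD cur 0
            > nd.getD (cur, it.1.1) (-1)
          then nd.insert (cur, it.1.1) (it.2 + ((pvAllStates cols).foldl
            (fun d s => d.insert s (PySem.Int.bitCount s : Int)) PySem.Dict.empty).getD cur 0)
          else nd) nd) PySem.Dict.empty
        = rowStep sts dp := by
    intro dp sts hsts
    apply dpbody_eq
    rw [hvs] at hsts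
    obtain ⟨row, _, rfl⟩ := List.mem_map.mp hsts
    exact fun x hx => List.mem_of_mem_filter hx
  have hstep := PySem.List.foldl_congr_mem vs _ (fun dp sts => rowStep sts dp) dp0 hbody
  rw [hstep]
  have hAZ : AllZero vs := allZero_pvValid grid cols
  have hnd0 : dp0.keys.Nodup := by decide
  have hval0 : ∀ w ∈ dp0.values, (0:Int) ≤ w := by decide
  have hne0 : dp0.items ≠ [] := by decide
  obtain ⟨h1, h2, h3⟩ := main_fold vs dp0 hAZ hnd0 hval0 hne0
  set dpF := vs.foldl (fun dp sts => rowStep sts dp) dp0 with hdpF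
  have hvne : dpF.values ≠ [] := by
    intro hv
    exact h3 (by unfold PySem.Dict.values at hv; exact List.map_eq_nil_iff.mp hv ▸ rfl)
  obtain ⟨v, t, hvt⟩ := List.exists_cons_of_ne_nil hvne
  have hv0 : (0:Int) ≤ v := h2 v (by rw [hvt]; simp)
  have hfold : mI dpF (fun k => bestVal [] k.1 k.2) = t.foldl max v := by
    unfold mI
    rw [show (fun (it : (Int × Int) × Int) => it.2 + bestVal [] it.1.1 it.1.2)
        = (fun (it : (Int × Int) × Int) => it.2) by funext it; show it.2 + 0 = it.2; ring]
    have : dpF.items.map (fun (it : (Int × Int) × Int) => it.2) = dpF.values := rfl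
    rw [this, hvt, List.foldl_cons, show max (-1) v = v by omega]
  have hinit : mI dp0 (fun k => bestVal vs k.1 k.2) = bestVal vs 0 0 := by
    unfold mI
    have hit0 : dp0.items = [((0,0),(0:Int))] := by decide
    rw [hit0]
    simp only [List.map_cons, List.map_nil, List.foldl_cons, List.foldl_nil]
    have := bestVal_nonneg vs 0 0 hAZ
    omega
  rw [hvt, PySem.List.max?_id_cons]
  show t.foldl max v = bestVal vs 0 0
  rw [← hfold, h1, hinit]

-- ===== VERDICT (by name: the statement is the Claim_ definition above) =====
theorem solve_grid_spec : Claim_equal_solve_grid := by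
  intro grid _
  unfold Spec_solve_grid
  rw [A_eq, B_eq]
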